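-- pv_equiv track=rewrite | github.com/Prosper1030/hpa-mdo | src/hpa_mdo/hifi/gmsh_runner.py | _format_nset_block
-- ===== SOURCE A (Python) =====
-- from typing import Sequence
--
-- def _format_nset_block(name: str, node_ids: Sequence[int]) -> str:
--     lines = [f"*NSET, NSET={name}"]
--     chunk: list[str] = []
--     for node_id in node_ids:
--         chunk.append(str(int(node_id)))
--         if len(chunk) == 16:
--             lines.append(", ".join(chunk))
--             chunk = []
--     if chunk:
--         lines.append(", ".join(chunk))
--     return "\n".join(lines)
-- ===== SOURCE B (Python) =====
-- def _format_nset_block(name, node_ids):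
--     strs = [str(int(n)) for n in node_ids]
--     body = [", ".join(strs[i:i + 16]) for i in range(0, len(strs), 16)]
--     return "\n".join([f"*NSET, NSET={name}"] + body)
-- ===== Notes on version B (the rewrite author's own statement) =====
-- stated objective: simpler
-- what changed: Replaces the running chunk accumulator with its len==16 flush and trailing-remainder flush by a materialize-then-slice shape: format all ids once, then build body lines by index-stepped slicing strs[i:i+16] over range(0, len, 16).
import Mathlib
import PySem

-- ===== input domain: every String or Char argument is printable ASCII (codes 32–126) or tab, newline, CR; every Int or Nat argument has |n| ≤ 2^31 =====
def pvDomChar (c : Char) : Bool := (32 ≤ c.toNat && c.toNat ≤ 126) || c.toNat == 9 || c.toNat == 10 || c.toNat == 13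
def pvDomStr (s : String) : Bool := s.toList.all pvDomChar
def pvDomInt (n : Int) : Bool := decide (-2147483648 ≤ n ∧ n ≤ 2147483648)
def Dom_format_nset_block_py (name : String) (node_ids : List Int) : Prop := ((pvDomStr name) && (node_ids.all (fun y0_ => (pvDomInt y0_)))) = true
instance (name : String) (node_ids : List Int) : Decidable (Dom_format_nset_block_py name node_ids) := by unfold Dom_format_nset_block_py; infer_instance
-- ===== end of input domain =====

-- ===== PORT A =====
-- B formats all ids first and slices 16-at-a-time instead of A's running chunk accumulator; simpler decomposition, same cost.
def format_nset_block_py (name : String) (node_ids : List Int) : String :=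
  let step : List String × List String → Int → List String × List String :=
    fun st node_id =>
      let chunk := st.2 ++ [PySem.Int.toStr node_id]
      if chunk.length = 16 then (st.1 ++ [PySem.Str.join ", " chunk], [])
      else (st.1, chunk)
  let st := node_ids.foldl step (["*NSET, NSET=" ++ name], [])
  let lines := if st.2 = [] then st.1 else st.1 ++ [PySem.Str.join ", " st.2]
  PySem.Str.join "\n" lines

-- ===== PORT B =====
def format_nset_block_py_alt (name : String) (node_ids : List Int) : String :=
  let strs := node_ids.map PySem.Int.toStr
  let body := (PySem.List.pyRange 0 (strs.length : Int) 16).map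
    (fun i => PySem.Str.join ", " (PySem.List.slice strs (some i) (some (i + 16))))
  PySem.Str.join "\n" (("*NSET, NSET=" ++ name) :: body)
-- ===== PRECONDITION & SPEC =====
def Spec_format_nset_block_py (name : String) (node_ids : List Int) (out : String) : Prop := out = format_nset_block_py_alt name node_ids
instance (name : String) (node_ids : List Int) (out : String) : Decidable (Spec_format_nset_block_py name node_ids out) := by unfold Spec_format_nset_block_py; infer_instance

-- ===== CLAIM (what is proved, stated in full; the proofs are below) =====
def Claim_equal_format_nset_block_py : Prop := ∀ (name : String) (node_ids : List Int), Dom_format_nset_block_py name node_ids → Spec_format_nset_block_py name node_ids (format_nset_block_py name node_ids)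

-- ===== LEMMAS AND PROOFS =====

-- 16-chunking of a list, the common characterisation of both bodies
def chunks16 (xs : List String) : List (List String) :=
  if xs = [] then [] else xs.take 16 :: chunks16 (xs.drop 16)
termination_by xs.length
decreasing_by
  simp only [List.length_drop]
  have hne : xs ≠ [] := by assumption
  have := List.length_pos_iff.mpr hne
  omega

-- A's loop step (same as in the port)
def stepA (st : List String × List String) (s : String) : List String × List String :=
  let chunk := st.2 ++ [s]
  if chunk.length = 16 then (st.1 ++ [PySem.Str.join ", " chunk], [])
  else (st.1, chunk)

def finishA (st : List String × List String) : List String :=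
  if st.2 = [] then st.1 else st.1 ++ [PySem.Str.join ", " st.2]

lemma chunks16_nil : chunks16 [] = [] := by rw [chunks16]; simp

lemma chunks16_small (chunk : List String) (hc : chunk ≠ []) (h : chunk.length < 16) :
    chunks16 chunk = [chunk] := by
  rw [chunks16, if_neg hc, List.take_of_length_le (le_of_lt h),
      List.drop_eq_nil_of_le (le_of_lt h), chunks16_nil]

lemma chunks16_full (chunk rest : List String) (h : chunk.length = 16) :
    chunks16 (chunk ++ rest) = chunk :: chunks16 rest := by
  have hlen : (chunk ++ rest).length ≠ 0 := by simp [h]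
  have hne : chunk ++ rest ≠ [] := fun e => hlen (by rw [e]; rfl)
  rw [chunks16, if_neg hne,
      List.take_append_of_le_length (by omega),
      List.drop_append_of_le_length (by omega),
      List.take_of_length_le (by omega), List.drop_eq_nil_of_le (by omega),
      List.nil_append]

lemma loopA_eq (xs : List String) : ∀ (lines chunk : List String), chunk.length < 16 →
    finishA (xs.foldl stepA (lines, chunk))
      = lines ++ (chunks16 (chunk ++ xs)).map (PySem.Str.join ", ") := by
  induction xs with
  | nil =>
    intro lines chunk h
    rw [List.foldl_nil, List.append_nil]
    by_cases hc : chunk = []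
    · subst hc; simp [finishA, chunks16_nil]
    · rw [chunks16_small chunk hc h]
      simp [finishA, hc]
  | cons x rest ih =>
    intro lines chunk h
    rw [List.foldl_cons]
    have hstep : stepA (lines, chunk) x =
        if (chunk ++ [x]).length = 16 then (lines ++ [PySem.Str.join ", " (chunk ++ [x])], [])
        else (lines, chunk ++ [x]) := rfl
    rw [hstep]
    by_cases h16 : (chunk ++ [x]).length = 16
    · rw [if_pos h16, ih _ [] (by simp)]
      have : chunk ++ x :: rest = (chunk ++ [x]) ++ rest := by simp
      rw [this, chunks16_full _ _ h16]
      simp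
    · rw [if_neg h16, ih _ (chunk ++ [x]) (by simp at h16 ⊢; omega)]
      have : chunk ++ [x] ++ rest = chunk ++ x :: rest := by simp
      rw [this]

-- range step-16 cons lemma
lemma pyRange16_cons (a b : Int) (hab : a < b) :
    PySem.List.pyRange a b 16 = a :: PySem.List.pyRange (a + 16) b 16 := by
  rw [PySem.List.pyRange_of_pos a b (by norm_num), PySem.List.pyRange_of_pos (a+16) b (by norm_num)]
  rw [if_pos hab]
  by_cases h2 : a + 16 < b
  · rw [if_pos h2]
    have hcount : ((b - a + 16 - 1) / 16).toNat = ((b - (a + 16) + 16 - 1) / 16).toNat + 1 := by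
      omega
    rw [hcount, List.range_succ_eq_map, List.map_cons, List.map_map]
    congr 1
    · simp
    · apply List.map_congr_left
      intro k _
      simp [Function.comp]
      ring
  · rw [if_neg h2]
    have hcount : ((b - a + 16 - 1) / 16).toNat = 1 := by omega
    rw [hcount]
    simp

-- shift a step-16 range down by 16
lemma pyRange16_shift (b : Int) :
    PySem.List.pyRange 16 b 16 = (PySem.List.pyRange 0 (b - 16) 16).map (· + 16) := by
  rw [PySem.List.pyRange_of_pos 16 b (by norm_num), PySem.List.pyRange_of_pos 0 (b-16) (by norm_num)]
  rw [List.map_map]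
  have hcond : (if (16:Int) < b then ((b - 16 + 16 - 1) / 16).toNat else 0)
      = (if (0:Int) < b - 16 then ((b - 16 - 0 + 16 - 1) / 16).toNat else 0) := by
    split_ifs <;> omega
  rw [hcond]
  apply List.map_congr_left
  intro k _
  simp [Function.comp]
  ring

lemma sliceMap_eq (strs : List String) :
    (PySem.List.pyRange 0 (strs.length : Int) 16).map
      (fun i => PySem.List.slice strs (some i) (some (i + 16))) = chunks16 strs := by
  by_cases hnil : strs = []
  · subst hnil
    rw [chunks16]
    simp [PySem.List.pyRange_of_pos 0 0 (by norm_num : (0:Int) < 16)]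
  · have hlen : 0 < strs.length := List.length_pos_iff.mpr hnil
    rw [pyRange16_cons 0 strs.length (by exact_mod_cast hlen), List.map_cons]
    rw [chunks16, if_neg hnil]
    congr 1
    · show PySem.List.slice strs (some (0:Int)) (some (0 + 16)) = strs.take 16
      rw [PySem.List.slice_toNat strs (by norm_num) (by norm_num)]
      norm_num
      rfl
    · rw [zero_add, pyRange16_shift, List.map_map]
      have hsh : ∀ i ∈ PySem.List.pyRange 0 ((strs.length : Int) - 16) 16,
          ((fun i => PySem.List.slice strs (some i) (some (i + 16))) ∘ (· + 16)) i
            = (fun i => PySem.List.slice (strs.drop 16) (some i) (some (i + 16))) i := by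
        intro i hi
        have hi0 : 0 ≤ i := by
          have := ((PySem.List.mem_pyRange_iff_of_pos (by norm_num : (0:Int) < 16)) i).mp hi
          omega
        simp only [Function.comp]
        rw [PySem.List.slice_toNat strs (a := i + 16) (b := i + 16 + 16) (by omega) (by omega),
            PySem.List.slice_toNat (strs.drop 16) (a := i) (b := i + 16) hi0 (by omega)]
        have e1 : (i + 16).toNat = i.toNat + 16 := by omega
        have e2 : (i + 16 + 16).toNat = i.toNat + 32 := by omega
        rw [List.drop_drop, e1, e2, Nat.add_comm 16 i.toNat]
        congr 1
        all_goals omega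
      rw [List.map_congr_left hsh]
      by_cases hge : 16 ≤ strs.length
      · have : (strs.length : Int) - 16 = ((strs.drop 16).length : Int) := by
          simp [List.length_drop]; omega
        rw [this, sliceMap_eq (strs.drop 16)]
      · have h1 : PySem.List.pyRange 0 ((strs.length : Int) - 16) 16 = [] := by
          rw [PySem.List.pyRange_of_pos 0 _ (by norm_num : (0:Int) < 16), if_neg (by omega)]
          simp
        have h2 : strs.drop 16 = [] := List.drop_eq_nil_of_le (by omega)
        rw [h1, h2, chunks16]
        simp
termination_by strs.length
decreasing_by simp [List.length_drop]; omega

-- ===== VERDICT (by name: the statement is the Claim_ definition above) =====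
theorem format_nset_block_py_spec : Claim_equal_format_nset_block_py := by
  intro name node_ids _
  show format_nset_block_py name node_ids = format_nset_block_py_alt name node_ids
  unfold format_nset_block_py format_nset_block_py_alt
  simp only
  congr 1
  have hfold : node_ids.foldl
      (fun st node_id =>
        let chunk := st.2 ++ [PySem.Int.toStr node_id]
        if chunk.length = 16 then (st.1 ++ [PySem.Str.join ", " chunk], [])
        else (st.1, chunk)) (["*NSET, NSET=" ++ name], ([] : List String))
      = (node_ids.map PySem.Int.toStr).foldl stepA (["*NSET, NSET=" ++ name], []) := by
    rw [List.foldl_map]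
    rfl
  rw [hfold]
  have := loopA_eq (node_ids.map PySem.Int.toStr) ["*NSET, NSET=" ++ name] [] (by norm_num)
  unfold finishA at this
  rw [List.nil_append] at this
  rw [this, ← sliceMap_eq (node_ids.map PySem.Int.toStr), List.map_map]
  rfl
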